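-- pv_equiv track=rewrite | github.com/mutjan/baba-is-agent | scripts/baba_rank_breakout_targets.py | props_by_subject
-- ===== SOURCE A (Python) =====
-- import collections
-- from typing import Any
--
-- def norm(value: Any) -> str:
--     return str(value or "").strip().lower()
--
-- def props_by_subject(state: dict[str, Any]) -> dict[str, set[str]]:
--     props: dict[str, set[str]] = collections.defaultdict(set)
--     for rule in state.get("rules", []):
--         subject = norm(rule.get("target"))
--         effect = norm(rule.get("effect"))
--         if subject and effect:
--             props[subject].add(effect)
--     return props
-- ===== SOURCE B (Python) =====
-- import collections
--
--
-- def norm(value):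
--     return str(value or "").strip().lower()
--
--
-- def props_by_subject(state):
--     # One normalized pass, then group per distinct subject (first-occurrence order).
--     pairs = [(s, e)
--              for s, e in ((norm(r.get("target")), norm(r.get("effect")))
--                           for r in state.get("rules", []))
--              if s and e]
--     subjects = dict.fromkeys(s for s, _ in pairs)
--     grouped = {s: {e for s2, e in pairs if s2 == s} for s in subjects}
--     return collections.defaultdict(set, grouped)
-- ===== Notes on version B (the rewrite author's own statement) =====
-- stated objective: idiomatic
-- what changed: Replaces the single imperative loop that mutates a defaultdict with a declarative pipeline: normalize+filter into a (subject, effect) pair list once, take distinct subjects via dict.fromkeys, and build each subject's effect set by a comprehension over the pair list.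
import Mathlib
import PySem

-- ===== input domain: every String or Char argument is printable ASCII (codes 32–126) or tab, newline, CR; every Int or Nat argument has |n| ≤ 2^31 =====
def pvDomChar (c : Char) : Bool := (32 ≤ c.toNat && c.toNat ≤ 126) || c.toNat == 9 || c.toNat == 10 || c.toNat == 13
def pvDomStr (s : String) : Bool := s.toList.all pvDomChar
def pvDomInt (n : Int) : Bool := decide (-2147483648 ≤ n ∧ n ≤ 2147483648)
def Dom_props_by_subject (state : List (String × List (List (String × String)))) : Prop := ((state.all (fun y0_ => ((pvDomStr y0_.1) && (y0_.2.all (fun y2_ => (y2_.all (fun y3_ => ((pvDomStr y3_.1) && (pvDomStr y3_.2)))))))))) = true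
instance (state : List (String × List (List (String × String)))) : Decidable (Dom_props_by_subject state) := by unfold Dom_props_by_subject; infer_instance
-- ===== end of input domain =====

-- B groups a once-normalized (subject, effect) pair list per distinct subject instead of
-- mutating a defaultdict inside the loop; return values proved equal (idiomatic rewrite).

-- shared module helper: norm(value) = str(value or "").strip().lower()
def pvNorm (value : Option String) : String :=
  PySem.Str.lower (PySem.Str.strip
    (match value with
     | none => ""
     | some s => if s == "" then "" else s))

-- ===== PORT A =====
def props_by_subject (state : List (String × List (List (String × String)))) : List (String × List String) :=
  let props : PySem.Dict String (PySem.Set String) := PySem.Dict.empty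
  let props := (PySem.Dict.getD ⟨state⟩ "rules" []).foldl
    (fun props rule =>
      let subject := pvNorm ((PySem.Dict.mk rule).get? "target")
      let effect := pvNorm ((PySem.Dict.mk rule).get? "effect")
      if subject != "" && effect != "" then
        props.modify subject PySem.Set.empty (fun s => PySem.Set.add s effect)
      else props)
    props
  props.items

-- ===== PORT B =====
def props_by_subject_alt (state : List (String × List (List (String × String)))) : List (String × List String) :=
  let pairs := ((PySem.Dict.getD ⟨state⟩ "rules" []).map
      (fun r => (pvNorm ((PySem.Dict.mk r).get? "target"),
                 pvNorm ((PySem.Dict.mk r).get? "effect")))).filter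
    (fun p => p.1 != "" && p.2 != "")
  let subjects := PySem.List.dedup (pairs.map (·.1))
  subjects.map (fun s =>
    (s, PySem.Set.ofList ((pairs.filter (fun p => p.1 == s)).map (·.2))))

-- ===== PRECONDITION & SPEC =====
def Spec_props_by_subject (state : List (String × List (List (String × String)))) (out : List (String × List String)) : Prop := out = props_by_subject_alt state
instance (state : List (String × List (List (String × String)))) (out : List (String × List String)) : Decidable (Spec_props_by_subject state out) := by unfold Spec_props_by_subject; infer_instance

-- ===== CLAIM (what is proved, stated in full; the proofs are below) =====
def Claim_equal_props_by_subject : Prop := ∀ (state : List (String × List (List (String × String)))), Dom_props_by_subject state → Spec_props_by_subject state (props_by_subject state)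

-- ===== LEMMAS AND PROOFS =====

-- A's guarded loop over rules equals the plain modify-loop over the filtered pair list.
theorem pv_fold_filter (rules : List (List (String × String)))
    (d : PySem.Dict String (PySem.Set String)) :
    rules.foldl
      (fun props rule =>
        let subject := pvNorm ((PySem.Dict.mk rule).get? "target")
        let effect := pvNorm ((PySem.Dict.mk rule).get? "effect")
        if subject != "" && effect != "" then
          props.modify subject PySem.Set.empty (fun s => PySem.Set.add s effect)
        else props)
      d
    = ((rules.map (fun r => (pvNorm ((PySem.Dict.mk r).get? "target"),
                             pvNorm ((PySem.Dict.mk r).get? "effect")))).filter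
        (fun p => p.1 != "" && p.2 != "")).foldl
        (fun props p => props.modify p.1 PySem.Set.empty (fun s => PySem.Set.add s p.2)) d := by
  induction rules generalizing d with
  | nil => rfl
  | cons r rs ih =>
    simp only [List.foldl_cons, List.map_cons, List.filter_cons]
    by_cases h : (pvNorm ((PySem.Dict.mk r).get? "target") != "" &&
                  pvNorm ((PySem.Dict.mk r).get? "effect") != "") = true
    · simp only [h]; exact ih _
    · simp only [eq_false_of_ne_true h, Bool.false_eq_true, if_false]; exact ih d

-- lookup after the modify/add loop: the dict's set at c grows by the effects paired with c.
theorem pv_getD_fold (ps : List (String × String))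
    (d : PySem.Dict String (PySem.Set String)) (c : String) :
    (ps.foldl (fun props p => props.modify p.1 PySem.Set.empty (fun s => PySem.Set.add s p.2)) d).getD c PySem.Set.empty
    = PySem.Set.update (d.getD c PySem.Set.empty) ((ps.filter (fun p => p.1 == c)).map (·.2)) := by
  induction ps generalizing d with
  | nil => rfl
  | cons p ps ih =>
    simp only [List.foldl_cons, List.filter_cons]
    rw [ih]
    by_cases h : p.1 = c
    · subst h
      simp [PySem.Set.update]
    · have hb : (p.1 == c) = false := by simp [h]
      have h' : ¬ c = p.1 := fun e => h e.symm
      simp [PySem.Dict.getD_modify, hb, h']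

-- ===== VERDICT (by name: the statement is the Claim_ definition above) =====
theorem props_by_subject_spec : Claim_equal_props_by_subject := by
  intro state _
  unfold Spec_props_by_subject props_by_subject props_by_subject_alt
  simp only []
  rw [pv_fold_filter]
  set ps := ((PySem.Dict.getD ⟨state⟩ "rules" []).map
      (fun r => (pvNorm ((PySem.Dict.mk r).get? "target"),
                 pvNorm ((PySem.Dict.mk r).get? "effect")))).filter
    (fun p => p.1 != "" && p.2 != "") with hps
  have hnd : (ps.foldl (fun props p => props.modify p.1 PySem.Set.empty (fun s => PySem.Set.add s p.2)) PySem.Dict.empty).keys.Nodup := by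
    exact PySem.Dict.nodup_keys_foldl_modify_key ps (·.1) PySem.Set.empty
      (fun _ p s => PySem.Set.add s p.2) PySem.Dict.empty PySem.Dict.nodup_keys_empty
  rw [PySem.Dict.items_eq_map_keys _ hnd PySem.Set.empty]
  have hk : (ps.foldl (fun props p => props.modify p.1 PySem.Set.empty (fun s => PySem.Set.add s p.2)) PySem.Dict.empty).keys
      = PySem.List.dedup (ps.map (·.1)) := by
    rw [PySem.Dict.keys_foldl_modify_key]
    simp [PySem.Dict.keys_empty, PySem.Set.update_nil_left]
  rw [hk]
  refine List.map_congr_left ?_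
  intro s _
  rw [pv_getD_fold]
  simp [PySem.Dict.getD_empty, PySem.Set.update_nil_left, PySem.Set.empty]
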